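-- pv_equiv track=rewrite | github.com/arefeh-rj/SLA-passed | app/notify_manager.py | dedupe_by_manager
-- ===== SOURCE A (Python) =====
-- def dedupe_by_manager(managers, prefer_primary=True):
--     keep_at = {}   # manager_id -> index in result
--     out = []
--     for row in managers:
--         mid = row.get("manager_id")
--         if mid not in keep_at:
--             keep_at[mid] = len(out)
--             out.append(row)
--         else:
--             # conflict: decide which to keep
--             i = keep_at[mid]
--             cur = out[i]
--             if prefer_primary and row.get("is_primary") and not cur.get("is_primary"):
--                 out[i] = row
--             # else keep existing
--     return out
-- ===== SOURCE B (Python) =====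
-- def dedupe_by_manager(managers, prefer_primary=True):
--     # Group the rows by manager_id (dict keeps first-seen key order), then pick
--     # one row per group: the first primary row if prefer_primary and one exists,
--     # otherwise the first row of the group.  This matches the original's
--     # "replace once, first primary wins" behaviour by construction.
--     groups = {}
--     for row in managers:
--         groups.setdefault(row.get("manager_id"), []).append(row)
--
--     def pick(rows):
--         if prefer_primary:
--             return next((r for r in rows if r.get("is_primary")), rows[0])
--         return rows[0]
--
--     return [pick(rows) for rows in groups.values()]
-- ===== Notes on version B (the rewrite author's own statement) =====
-- stated objective: alternative
-- what changed: B replaces A's single conflict-resolving pass (index dict + in-place replacement in the output list) by two stages: first group all rows by manager_id into lists, then select one row per group by the rule 'first row with truthy is_primary if prefer_primary, else the first row of the group' - the conflict logic disappears into a per-group selection.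
import Mathlib
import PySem

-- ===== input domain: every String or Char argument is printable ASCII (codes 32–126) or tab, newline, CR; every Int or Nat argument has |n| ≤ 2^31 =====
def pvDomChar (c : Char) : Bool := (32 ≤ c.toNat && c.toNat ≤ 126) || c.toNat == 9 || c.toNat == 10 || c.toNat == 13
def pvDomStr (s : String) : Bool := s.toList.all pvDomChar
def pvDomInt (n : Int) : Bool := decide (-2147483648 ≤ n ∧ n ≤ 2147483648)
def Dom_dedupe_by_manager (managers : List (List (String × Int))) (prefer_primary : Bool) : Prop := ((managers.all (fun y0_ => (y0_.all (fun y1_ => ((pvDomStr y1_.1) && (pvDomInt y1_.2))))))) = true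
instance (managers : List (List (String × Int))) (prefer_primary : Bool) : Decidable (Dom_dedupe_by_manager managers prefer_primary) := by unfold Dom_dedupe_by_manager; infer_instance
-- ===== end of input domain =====

-- B replaces A's single conflict-resolving pass by two stages (group rows by manager_id, then pick
-- "first primary else first" per group); objective: alternative decomposition, same O(n) cost.

-- shared helper: Python `row.get(k)` on a row dict (rows are association lists here)
def pvRowGet (row : List (String × Int)) (k : String) : Option Int :=
  PySem.Dict.get? (PySem.Dict.mk row) k

-- truthiness of `row.get(k)` (None falsy, int truthy iff nonzero)
def pvTruthy (o : Option Int) : Bool :=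
  match o with
  | some n => n != 0
  | none => false

-- ===== PORT A =====
-- the body of A's for-loop on state (keep_at, out); `out[i]` / `out[i] = row` use pyGetD/pySetD:
-- i = keep_at[mid] is always in range, and keep_at[mid] always hits (getD 0 is exact there)
def pvStepA (pp : Bool)
    (st : PySem.Dict (Option Int) Int × List (List (String × Int)))
    (row : List (String × Int)) :
    PySem.Dict (Option Int) Int × List (List (String × Int)) :=
  let mid := pvRowGet row "manager_id"
  if !(st.1.contains mid) then
    (st.1.insert mid (st.2.length : Int), st.2 ++ [row])
  else
    let i := (st.1.get? mid).getD 0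
    let cur := PySem.List.pyGetD st.2 i []
    if pp && pvTruthy (pvRowGet row "is_primary") && !(pvTruthy (pvRowGet cur "is_primary")) then
      (st.1, PySem.List.pySetD st.2 i row)
    else
      st

def dedupe_by_manager (managers : List (List (String × Int))) (prefer_primary : Bool) : List (List (String × Int)) :=
  (managers.foldl (pvStepA prefer_primary) (PySem.Dict.empty, [])).2

-- ===== PORT B =====
-- pick(rows): first row with truthy is_primary if prefer_primary, else rows[0];
-- groups are nonempty by construction, so headD [] is exact for rows[0]
def pvPick (pp : Bool) (rows : List (List (String × Int))) : List (String × Int) :=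
  if pp then
    (rows.find? (fun r => pvTruthy (pvRowGet r "is_primary"))).getD (rows.headD [])
  else
    rows.headD []

-- groups.setdefault(mid, []).append(row) = modify mid [] (· ++ [row])
def dedupe_by_manager_alt (managers : List (List (String × Int))) (prefer_primary : Bool) : List (List (String × Int)) :=
  let groups := managers.foldl
    (fun d row => d.modify (pvRowGet row "manager_id") [] (· ++ [row])) PySem.Dict.empty
  groups.values.map (pvPick prefer_primary)

-- ===== PRECONDITION & SPEC =====
def Spec_dedupe_by_manager (managers : List (List (String × Int))) (prefer_primary : Bool) (out : List (List (String × Int))) : Prop := out = dedupe_by_manager_alt managers prefer_primary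
instance (managers : List (List (String × Int))) (prefer_primary : Bool) (out : List (List (String × Int))) : Decidable (Spec_dedupe_by_manager managers prefer_primary out) := by unfold Spec_dedupe_by_manager; infer_instance

-- ===== CLAIM (what is proved, stated in full; the proofs are below) =====
def Claim_equal_dedupe_by_manager : Prop := ∀ (managers : List (List (String × Int))) (prefer_primary : Bool), Dom_dedupe_by_manager managers prefer_primary → Spec_dedupe_by_manager managers prefer_primary (dedupe_by_manager managers prefer_primary)

-- ===== LEMMAS AND PROOFS =====

-- proof-side abbreviations
def pvMid (row : List (String × Int)) : Option Int := pvRowGet row "manager_id"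
def pvPrim (row : List (String × Int)) : Bool := pvTruthy (pvRowGet row "is_primary")

-- the grouped-rows list for a key, and the common "spec" both programs compute
def pvRows (l : List (List (String × Int))) (m : Option Int) : List (List (String × Int)) :=
  l.filter (fun r => pvMid r == m)

def pvSpec (pp : Bool) (l : List (List (String × Int))) : List (List (String × Int)) :=
  (PySem.Set.ofList (l.map pvMid)).map (fun k => pvPick pp (pvRows l k))

theorem pv_idxOf_append_left {α : Type} [BEq α] [LawfulBEq α] (l t : List α) (x : α) (h : x ∈ l) :
    (l ++ t).idxOf x = l.idxOf x := by
  induction l with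
  | nil => cases h
  | cons a l ih =>
    by_cases hax : x = a
    · subst hax; simp
    · rcases List.mem_cons.mp h with h' | h'
      · exact absurd h' hax
      · simp only [List.cons_append]
        simp [Ne.symm hax, ih h']

theorem pv_idxOf_append_self {α : Type} [BEq α] [LawfulBEq α] (l : List α) (x : α) (h : x ∉ l) :
    (l ++ [x]).idxOf x = l.length := by
  induction l with
  | nil => simp
  | cons a l ih =>
    have hax : x ≠ a := fun he => h (he ▸ List.mem_cons_self)
    simp only [List.cons_append]
    simp [Ne.symm hax, ih (fun hm => h (List.mem_cons_of_mem _ hm))]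

theorem pv_getD_map_idxOf {α β : Type} [BEq α] [LawfulBEq α] [DecidableEq α]
    (l : List α) (f : α → β) (x : α) (d : β)
    (h : x ∈ l) : (l.map f).getD (l.idxOf x) d = f x := by
  induction l with
  | nil => cases h
  | cons a l ih =>
    by_cases hax : x = a
    · subst hax; simp
    · rcases List.mem_cons.mp h with h' | h'
      · exact absurd h' hax
      · have hh := ih h'
        simp only [List.map_cons]
        simpa [Ne.symm hax, List.getD] using hh

theorem pv_set_map_idxOf {α β : Type} [BEq α] [LawfulBEq α] [DecidableEq α]
    (l : List α) (f : α → β) (x : α) (v : β)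
    (h : x ∈ l) (hnd : l.Nodup) :
    (l.map f).set (l.idxOf x) v = l.map (fun m => if m = x then v else f m) := by
  induction l with
  | nil => cases h
  | cons a l ih =>
    rcases List.nodup_cons.mp hnd with ⟨hna, hnd'⟩
    by_cases hax : x = a
    · subst hax
      simp only [List.map_cons, List.idxOf_cons_self, List.set_cons_zero]
      simp only [if_true]
      congr 1
      exact (List.map_congr_left (fun m hm => by
        have hmx : m ≠ x := fun he => hna (he ▸ hm)
        simp [hmx])).symm
    · rcases List.mem_cons.mp h with h' | h'
      · exact absurd h' hax
      · simp only [List.map_cons]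
        simp [Ne.symm hax, ih h' hnd']

-- pick on a single-row group is that row
theorem pv_pick_singleton (pp : Bool) (r : List (String × Int)) : pvPick pp [r] = r := by
  cases pp <;> simp [pvPick] <;> split <;> simp_all

-- how pick evolves when one more row joins a nonempty group: exactly A's replacement rule
theorem pv_pick_append (pp : Bool) (rs : List (List (String × Int))) (r : List (String × Int))
    (h : rs ≠ []) :
    pvPick pp (rs ++ [r]) =
      if pp && pvPrim r && !pvPrim (pvPick pp rs) then r else pvPick pp rs := by
  obtain ⟨a, t, rfl⟩ : ∃ a t, rs = a :: t := by
    cases rs with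
    | nil => exact absurd rfl h
    | cons a t => exact ⟨a, t, rfl⟩
  cases pp with
  | false => simp [pvPick]
  | true =>
    simp only [pvPick, if_true, Bool.true_and]
    rw [List.cons_append, List.find?_cons, List.find?_cons]
    cases ha : pvTruthy (pvRowGet a "is_primary") with
    | true => simp [pvPrim, ha]
    | false =>
      cases hf : t.find? (fun r => pvTruthy (pvRowGet r "is_primary")) with
      | some x =>
        have hx : pvTruthy (pvRowGet x "is_primary") = true := by
          simpa using List.find?_some hf
        rw [List.find?_append, hf]
        simp [pvPrim, hx]
      | none =>
        rw [List.find?_append, hf]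
        cases hr : pvTruthy (pvRowGet r "is_primary") with
        | true => simp [pvPrim, ha, hr]
        | false => simp [pvPrim, ha, hr]

-- a key in the seen-key set has a nonempty group
theorem pv_rows_ne_nil (l : List (List (String × Int))) (m : Option Int)
    (h : m ∈ PySem.Set.ofList (l.map pvMid)) : pvRows l m ≠ [] := by
  have hm : m ∈ l.map pvMid := (PySem.Set.mem_ofList _ _).mp h
  rcases List.mem_map.mp hm with ⟨r, hr, hrm⟩
  intro hnil
  have := List.filter_eq_nil_iff.mp hnil r hr
  simp [hrm] at this

-- a key not yet seen has an empty group
theorem pv_rows_nil (l : List (List (String × Int))) (m : Option Int)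
    (h : m ∉ PySem.Set.ofList (l.map pvMid)) : pvRows l m = [] := by
  apply List.filter_eq_nil_iff.mpr
  intro r hr
  have hne : pvMid r ≠ m := fun he =>
    h ((PySem.Set.mem_ofList _ _).mpr (List.mem_map.mpr ⟨r, hr, he⟩))
  simpa using hne

-- groups for l ++ [row]
theorem pv_rows_append (l : List (List (String × Int))) (row : List (String × Int)) (m : Option Int) :
    pvRows (l ++ [row]) m = pvRows l m ++ (if pvMid row == m then [row] else []) := by
  by_cases hc : pvMid row = m <;>
    simp [pvRows, List.filter_append, hc]

-- the full invariant of A's loop, by induction from the right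
theorem pv_stateA (pp : Bool) (l : List (List (String × Int))) :
    (l.foldl (pvStepA pp) (PySem.Dict.empty, [])).2 = pvSpec pp l
    ∧ (∀ m, (l.foldl (pvStepA pp) (PySem.Dict.empty, [])).1.contains m
        = decide (m ∈ PySem.Set.ofList (l.map pvMid)))
    ∧ (∀ m ∈ PySem.Set.ofList (l.map pvMid),
        (l.foldl (pvStepA pp) (PySem.Dict.empty, [])).1.get? m
          = some (((PySem.Set.ofList (l.map pvMid)).idxOf m : Nat) : Int)) := by
  induction l using List.reverseRecOn with
  | nil =>
    refine ⟨rfl, fun m => by simp [PySem.Dict.contains_empty, PySem.Set.ofList_nil], fun m hm => by cases hm⟩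
  | append_singleton l row ih =>
    obtain ⟨h1, h2, h3⟩ := ih
    set st := l.foldl (pvStepA pp) (PySem.Dict.empty, []) with hst
    set K := PySem.Set.ofList (l.map pvMid) with hK
    have hKnd : K.Nodup := by rw [hK]; exact PySem.Set.nodup_ofList _
    have hK' : PySem.Set.ofList ((l ++ [row]).map pvMid) = PySem.Set.add K (pvMid row) := by
      rw [List.map_append, List.map_singleton, PySem.Set.ofList_append_singleton]
    rw [List.foldl_append, List.foldl_cons, List.foldl_nil]
    by_cases hm : pvMid row ∈ K
    · -- key already seen: keep_at unchanged, maybe replace out[i]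
      have hKeq : PySem.Set.ofList ((l ++ [row]).map pvMid) = K := by
        rw [hK', PySem.Set.add_of_mem hm]
      have hcont : st.1.contains (pvMid row) = true := by rw [h2]; simp [hm]
      have hget : st.1.get? (pvMid row) = some ((K.idxOf (pvMid row) : Nat) : Int) := h3 _ hm
      have hcur : PySem.List.pyGetD st.2 (((st.1.get? (pvMid row)).getD 0)) []
          = pvPick pp (pvRows l (pvMid row)) := by
        rw [hget, Option.getD_some, PySem.List.pyGetD_natCast, h1, pvSpec]
        exact pv_getD_map_idxOf _ _ _ _ hm
      have hspec' : pvSpec pp (l ++ [row])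
          = K.map (fun k =>
              if k = pvMid row
              then (if pp && pvPrim row && !pvPrim (pvPick pp (pvRows l (pvMid row)))
                    then row else pvPick pp (pvRows l (pvMid row)))
              else pvPick pp (pvRows l k)) := by
        rw [pvSpec, hKeq]
        refine List.map_congr_left (fun k hk => ?_)
        rw [pv_rows_append]
        by_cases hkm : k = pvMid row
        · subst hkm
          simp only [BEq.rfl, if_true]
          rw [pv_pick_append pp _ row (pv_rows_ne_nil l _ hm)]
        · have : (pvMid row == k) = false := beq_false_of_ne (Ne.symm hkm)
          simp [this, hkm]
      refine ⟨?_, ?_, ?_⟩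
      · show (pvStepA pp st row).2 = _
        unfold pvStepA
        rw [show pvRowGet row "manager_id" = pvMid row from rfl]
        simp only [hcont, Bool.not_true, Bool.false_eq_true, if_false, hcur]
        rw [hspec']
        by_cases hrep : (pp && pvTruthy (pvRowGet row "is_primary")
            && !(pvTruthy (pvRowGet (pvPick pp (pvRows l (pvMid row))) "is_primary"))) = true
        · simp only [hrep, if_true]
          rw [hget, Option.getD_some, PySem.List.pySetD_natCast, h1, pvSpec]
          rw [pv_set_map_idxOf _ _ _ _ hm hKnd]
          refine List.map_congr_left (fun k hk => ?_)
          by_cases hkm : k = pvMid row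
          · subst hkm
            have hc : (pp && pvPrim row && !pvPrim (pvPick pp (pvRows l (pvMid row)))) = true := hrep
            obtain ⟨⟨hc1, hc2⟩, hc3⟩ := by
              rw [Bool.and_eq_true, Bool.and_eq_true] at hc; exact hc
            subst hc1
            have hc3' : pvPrim (pvPick true (pvRows l (pvMid row))) = false := by
              simpa using hc3
            simp [hc2, hc3']
          · simp [hkm]
        · rw [if_neg hrep, h1, pvSpec]
          refine (List.map_congr_left (fun k hk => ?_)).symm
          by_cases hkm : k = pvMid row
          · subst hkm
            have hn : ¬ ((pp && pvPrim row && !pvPrim (pvPick pp (pvRows l (pvMid row)))) = true) := hrep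
            rw [if_neg hn]
            simp
          · simp [hkm]
      · intro m
        show (pvStepA pp st row).1.contains m = _
        unfold pvStepA
        rw [show pvRowGet row "manager_id" = pvMid row from rfl]
        simp only [hcont, Bool.not_true, Bool.false_eq_true, if_false]
        rw [hKeq]
        split <;> exact h2 m
      · intro m hmem
        rw [hKeq] at hmem ⊢
        show (pvStepA pp st row).1.get? m = _
        unfold pvStepA
        rw [show pvRowGet row "manager_id" = pvMid row from rfl]
        simp only [hcont, Bool.not_true, Bool.false_eq_true, if_false]
        split <;> exact h3 m hmem
    · -- fresh key: append to keep_at and out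
      have hKeq : PySem.Set.ofList ((l ++ [row]).map pvMid) = K ++ [pvMid row] := by
        rw [hK', PySem.Set.add_of_not_mem hm]
      have hcont : st.1.contains (pvMid row) = false := by rw [h2]; simp [hm]
      have hlen : st.2.length = K.length := by
        rw [h1, pvSpec, List.length_map, hK]
      refine ⟨?_, ?_, ?_⟩
      · show (pvStepA pp st row).2 = _
        unfold pvStepA
        rw [show pvRowGet row "manager_id" = pvMid row from rfl]
        simp only [hcont, Bool.not_false, if_true]
        rw [pvSpec, hKeq, List.map_append, List.map_singleton, h1, pvSpec]
        congr 1
        · refine List.map_congr_left (fun k hk => ?_)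
          have hkm : (pvMid row == k) = false :=
            beq_false_of_ne (fun he => hm (he ▸ hk))
          rw [pv_rows_append, hkm]
          simp
        · rw [pv_rows_append]
          simp only [BEq.rfl, if_true]
          rw [pv_rows_nil l _ hm, List.nil_append, pv_pick_singleton]
      · intro m
        show (pvStepA pp st row).1.contains m = _
        unfold pvStepA
        rw [show pvRowGet row "manager_id" = pvMid row from rfl]
        simp only [hcont, Bool.not_false, if_true]
        rw [PySem.Dict.contains_insert, hKeq, h2 m]
        by_cases hmm : m = pvMid row
        · subst hmm; simp
        · simp [beq_false_of_ne hmm, hmm]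
      · intro m hmem
        show (pvStepA pp st row).1.get? m = _
        unfold pvStepA
        rw [show pvRowGet row "manager_id" = pvMid row from rfl]
        simp only [hcont, Bool.not_false, if_true]
        rw [hKeq] at hmem ⊢
        by_cases hmm : m = pvMid row
        · subst hmm
          rw [PySem.Dict.get?_insert_self, pv_idxOf_append_self _ _ hm, hlen]
        · rw [PySem.Dict.get?_insert_of_ne _ _ hmm]
          rcases List.mem_append.mp hmem with hml | hml
          · rw [h3 m hml, pv_idxOf_append_left _ _ _ hml]
          · exact absurd (by simpa using hml) hmm
  -- B equals the same spec, via the library characterisation of the grouping fold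

theorem pv_groups_getD (l : List (List (String × Int))) (m : Option Int) :
    (l.foldl (fun d row => d.modify (pvRowGet row "manager_id") [] (· ++ [row]))
        (PySem.Dict.empty : PySem.Dict (Option Int) (List (List (String × Int))))).getD m []
      = pvRows l m := by
  have hfold : l.foldl (fun d row => d.modify (pvRowGet row "manager_id") [] (· ++ [row]))
      (PySem.Dict.empty : PySem.Dict (Option Int) (List (List (String × Int))))
      = (l.map (fun r => (pvMid r, r))).foldl
          (fun d p => d.modify p.1 [] (· ++ [p.2])) PySem.Dict.empty := by
    rw [List.foldl_map]
    rfl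
  rw [hfold, PySem.Dict.getD_foldl_modify_append, PySem.Dict.getD_empty, List.nil_append]
  rw [List.filter_map]
  simp [pvRows, Function.comp_def]

theorem pv_B_eq_spec (pp : Bool) (l : List (List (String × Int))) :
    dedupe_by_manager_alt l pp = pvSpec pp l := by
  have hnd : (l.foldl (fun d row => d.modify (pvRowGet row "manager_id") [] (· ++ [row]))
      (PySem.Dict.empty : PySem.Dict (Option Int) (List (List (String × Int))))).keys.Nodup :=
    PySem.Dict.nodup_keys_foldl_modify_key l (fun row => pvRowGet row "manager_id") []
      (fun d row => (· ++ [row])) PySem.Dict.empty (by simp [PySem.Dict.keys_empty])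
  have hkeys : (l.foldl (fun d row => d.modify (pvRowGet row "manager_id") [] (· ++ [row]))
      (PySem.Dict.empty : PySem.Dict (Option Int) (List (List (String × Int))))).keys
      = PySem.Set.ofList (l.map pvMid) := by
    rw [PySem.Dict.keys_foldl_modify_key, PySem.Dict.keys_empty]
    rw [PySem.Set.ofList_eq_foldl]
    rfl
  have halt : dedupe_by_manager_alt l pp
      = ((l.foldl (fun d row => d.modify (pvRowGet row "manager_id") [] (· ++ [row]))
          (PySem.Dict.empty : PySem.Dict (Option Int) (List (List (String × Int))))).values).map
          (pvPick pp) := rfl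
  rw [halt, PySem.Dict.values_eq_map_keys _ hnd [], hkeys, List.map_map, pvSpec]
  refine List.map_congr_left (fun k hk => ?_)
  simp only [Function.comp_apply]
  rw [pv_groups_getD]

-- ===== VERDICT (by name: the statement is the Claim_ definition above) =====
theorem dedupe_by_manager_spec : Claim_equal_dedupe_by_manager := by
  intro managers pp _
  unfold Spec_dedupe_by_manager
  rw [pv_B_eq_spec]
  exact (pv_stateA pp managers).1
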